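-- pv_equiv track=rewrite | github.com/KariolWang/Hero | Hero_Era_Pro/MainAI.py | choice_hero
-- ===== SOURCE A (Python) =====
-- def choice_hero(group_hero, heroes, k):
--     """
--     根据执行内容自动选择对应能力最高者来执行相应操作
--     :param group_hero: 势力英雄id列表
--     :param heroes: 所有英雄字典信息
--     :param k: 对应能力参数    0为h_id  1为h_lead    2为h_force   3为h_brain   4为h_politics    5为h_charm
--     :return: choice_id 返回选择的英雄id
--     """
--     hero = list()
--     h_ids = list()
--     lead = list()
--     force = list()
--     brain = list()
--     politics = list()
--     charm = list()
--     for h_id in group_hero: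
--         h_ids.append(h_id)
--         lead.append(heroes.get(h_id).get('h_lead'))
--         force.append(heroes.get(h_id).get('h_force'))
--         brain.append(heroes.get(h_id).get('h_brain'))
--         politics.append(heroes.get(h_id).get('h_politics'))
--         charm.append(heroes.get(h_id).get('h_charm'))
--         hero = [h_ids, lead, force, brain, politics, charm]
--     max_lead = max(hero[k])
--     max_lead_index = hero[k].index(max_lead)
--     choice_id = hero[0][max_lead_index]
--     return choice_id
-- ===== SOURCE B (Python) =====
-- def choice_hero(group_hero, heroes, k):
--     """Pick the id of the hero in group_hero whose k-th attribute is highest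
--     (first one wins on ties); k==0 means the id itself."""
--     keys = ['h_id', 'h_lead', 'h_force', 'h_brain', 'h_politics', 'h_charm']
--     def score(h_id):
--         return h_id if keys[k] == 'h_id' else heroes.get(h_id).get(keys[k])
--     return max(group_hero, key=score)
-- ===== Notes on version B (the rewrite author's own statement) =====
-- stated objective: simpler
-- what changed: Replaced A's six parallel attribute lists plus max()+index()+lookup with a single max(group_hero, key=score) pass that keeps the first hero with the maximal k-th attribute.
import Mathlib
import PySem

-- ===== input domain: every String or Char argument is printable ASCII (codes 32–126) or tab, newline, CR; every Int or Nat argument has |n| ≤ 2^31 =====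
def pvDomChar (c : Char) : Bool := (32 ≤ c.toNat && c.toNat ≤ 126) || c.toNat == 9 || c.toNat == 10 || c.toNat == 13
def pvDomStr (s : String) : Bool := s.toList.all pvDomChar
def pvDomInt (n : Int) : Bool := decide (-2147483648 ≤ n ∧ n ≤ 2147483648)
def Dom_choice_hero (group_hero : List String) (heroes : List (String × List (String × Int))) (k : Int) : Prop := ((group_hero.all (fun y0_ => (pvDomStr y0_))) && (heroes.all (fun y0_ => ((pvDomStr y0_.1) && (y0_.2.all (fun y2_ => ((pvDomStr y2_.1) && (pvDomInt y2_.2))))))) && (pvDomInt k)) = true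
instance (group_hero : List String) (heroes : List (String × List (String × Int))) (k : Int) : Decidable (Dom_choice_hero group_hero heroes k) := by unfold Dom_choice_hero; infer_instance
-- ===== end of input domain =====

-- B replaces A's six parallel attribute lists + max() + .index() + lookup by a
-- single max-with-key pass keeping the first maximal hero (objective: simpler).

-- Python runtime value appearing in these computations: a hero id (str),
-- an attribute (int), or None (missing dict key).
inductive PyV : Type
  | vs : String → PyV
  | vi : Int → PyV
  | vn : PyV
deriving DecidableEq, Repr

-- Python '<' on two such values; none = TypeError (incomparable).
def pyLt? : PyV → PyV → Option Bool
  | .vs a, .vs b => some (decide (a < b))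
  | .vi a, .vi b => some (decide (a < b))
  | _, _ => none

-- ===== PORT A =====
-- Python max(list): running maximum, '>' comparisons; none = ValueError/TypeError.
def pyMax? : List PyV → Option PyV
  | [] => none
  | h :: t => t.foldlM (fun cur x => (pyLt? cur x).map (fun b => if b then x else cur)) h

-- heroes.get(h_id).get(key): the inner .get returns None when the key is missing.
def attrVal (h : List (String × Int)) (key : String) : PyV :=
  match PySem.Dict.get? (PySem.Dict.mk h) key with
  | some v => PyV.vi v
  | none => PyV.vn

-- the loop body: append h_id and its five attributes; none = AttributeError
-- when heroes.get(h_id) is None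
def aStep (heroes : List (String × List (String × Int)))
    (st : Option (List PyV × List PyV × List PyV × List PyV × List PyV × List PyV))
    (h_id : String) : Option (List PyV × List PyV × List PyV × List PyV × List PyV × List PyV) :=
  match st, PySem.Dict.get? (PySem.Dict.mk heroes) h_id with
  | some st6, some h =>
      some (st6.1 ++ [PyV.vs h_id], st6.2.1 ++ [attrVal h "h_lead"],
            st6.2.2.1 ++ [attrVal h "h_force"], st6.2.2.2.1 ++ [attrVal h "h_brain"],
            st6.2.2.2.2.1 ++ [attrVal h "h_politics"], st6.2.2.2.2.2 ++ [attrVal h "h_charm"])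
  | _, _ => none

-- max_lead = max(col); max_lead_index = col.index(max_lead); choice_id = ids[max_lead_index]
def aSelect (ids col : List PyV) : String :=
  match pyMax? col with
  | none => ""                       -- TypeError comparing None (outside Pre_)
  | some m =>
    match PySem.List.index? col m with
    | none => ""                     -- unreachable: the max is in the list
    | some i =>
      match PySem.List.pyGet? ids (i : Int) with
      | some (.vs s) => s
      | _ => ""

def choice_hero (group_hero : List String) (heroes : List (String × List (String × Int))) (k : Int) : String :=
  match group_hero.foldl (aStep heroes)
      (some (([] : List PyV), ([] : List PyV), ([] : List PyV), ([] : List PyV), ([] : List PyV), ([] : List PyV))) with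
  | none => ""                       -- AttributeError (outside Pre_)
  | some (ids, lead, force, brain, politics, charm) =>
    let hero : List (List PyV) :=
      if group_hero.isEmpty then [] else [ids, lead, force, brain, politics, charm]
    match PySem.List.pyGet? hero k with
    | none => ""                     -- IndexError on hero[k] (outside Pre_)
    | some col => aSelect ids col

-- ===== PORT B =====
def bKeys : List String := ["h_id", "h_lead", "h_force", "h_brain", "h_politics", "h_charm"]

-- score(h_id) = h_id if keys[k] == 'h_id' else heroes.get(h_id).get(keys[k])
def bScore (heroes : List (String × List (String × Int))) (k : Int) (h_id : String) : Option PyV :=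
  match PySem.List.pyGet? bKeys k with
  | none => none                     -- IndexError on keys[k]
  | some kk =>
    if kk = "h_id" then some (PyV.vs h_id)
    else
      match PySem.Dict.get? (PySem.Dict.mk heroes) h_id with
      | none => none                 -- AttributeError: heroes.get(h_id) is None
      | some h =>
        some (match PySem.Dict.get? (PySem.Dict.mk h) kk with
              | some v => PyV.vi v
              | none => PyV.vn)

-- one step of max(..., key=score): replace the best on strict greater only
def bStep (heroes : List (String × List (String × Int))) (k : Int)
    (best : String × PyV) (g : String) : Option (String × PyV) := do
  let v ← bScore heroes k g
  let c ← pyLt? best.2 v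
  pure (if c then (g, v) else best)

-- max(group_hero, key=score): one pass, first maximal element wins.
def choice_hero_alt (group_hero : List String) (heroes : List (String × List (String × Int))) (k : Int) : String :=
  match group_hero with
  | [] => ""                         -- ValueError: max() of empty sequence (outside Pre_)
  | g0 :: rest =>
    match bScore heroes k g0 with
    | none => ""
    | some v0 =>
      match rest.foldlM (bStep heroes k) (g0, v0) with
      | some best => best.1
      | none => ""

-- ===== PRECONDITION & SPEC =====
-- Pre_ is exactly where the Python A returns: nonempty group (else ValueError),
-- -6 ≤ k ≤ 5 (else IndexError on hero[k]), every listed hero present in heroes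
-- (else AttributeError), and — unless k selects the id column or the group is a
-- singleton (max never compares) — the selected attribute key present in every
-- listed hero (else TypeError comparing None).
def Pre_choice_hero (group_hero : List String) (heroes : List (String × List (String × Int))) (k : Int) : Prop :=
  group_hero ≠ [] ∧ -6 ≤ k ∧ k ≤ 5 ∧
  (∀ h ∈ group_hero, ((PySem.Dict.get? (PySem.Dict.mk heroes) h).isSome : Bool) = true) ∧
  (k = 0 ∨ k = -6 ∨ group_hero.length = 1 ∨
    ∀ h ∈ group_hero,
      (((PySem.Dict.get? (PySem.Dict.mk heroes) h).bind
         (fun d => PySem.Dict.get? (PySem.Dict.mk d) ((PySem.List.pyGet? bKeys k).getD ""))).isSome : Bool) = true)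
instance (group_hero : List String) (heroes : List (String × List (String × Int))) (k : Int) : Decidable (Pre_choice_hero group_hero heroes k) := by unfold Pre_choice_hero; infer_instance

def pvWitness_choice_hero : List String × (List (String × List (String × Int))) × Int :=
  (["a", "b"], [("a", [("h_lead", 3)]), ("b", [("h_lead", 5)])], 1)

def Spec_choice_hero (group_hero : List String) (heroes : List (String × List (String × Int))) (k : Int) (out : String) : Prop := out = choice_hero_alt group_hero heroes k
instance (group_hero : List String) (heroes : List (String × List (String × Int))) (k : Int) (out : String) : Decidable (Spec_choice_hero group_hero heroes k out) := by unfold Spec_choice_hero; infer_instance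

-- ===== CLAIM (what is proved, stated in full; the proofs are below) =====
def Claim_equal_choice_hero : Prop := ∀ (group_hero : List String) (heroes : List (String × List (String × Int))) (k : Int), Dom_choice_hero group_hero heroes k → Pre_choice_hero group_hero heroes k → Spec_choice_hero group_hero heroes k (choice_hero group_hero heroes k)

-- ===== LEMMAS AND PROOFS =====

-- first element of g0 :: rest with maximal f-value (strict-greater updates)
def fargmax {σ α : Type} [LinearOrder α] (f : σ → α) : σ → List σ → σ
  | b, [] => b
  | b, g :: gs => fargmax f (if f b < f g then g else b) gs

theorem le_fargmax {σ α : Type} [LinearOrder α] (f : σ → α) :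
    ∀ (l : List σ) (b : σ), f b ≤ f (fargmax f b l) := by
  intro l
  induction l with
  | nil => intro b; simp [fargmax]
  | cons g gs ih =>
    intro b
    refine le_trans ?_ (ih (if f b < f g then g else b))
    split <;> simp_all [le_of_lt]

theorem fargmax_eq_self_of {σ α : Type} [LinearOrder α] (f : σ → α) :
    ∀ (l : List σ) (b : σ), f (fargmax f b l) ≤ f b → fargmax f b l = b := by
  intro l
  induction l with
  | nil => intro b _; rfl
  | cons g gs ih =>
    intro b hle
    simp only [fargmax] at hle ⊢
    by_cases h : f b < f g
    · exfalso
      rw [if_pos h] at hle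
      exact absurd (lt_of_lt_of_le h (le_fargmax f gs g)) (not_lt.mpr hle)
    · rw [if_neg h] at hle ⊢
      exact ih b hle

-- B's fold over the rest computes the first argmax (paired with its score)
theorem bfold_eq {α : Type} [LinearOrder α] (emb : α → PyV)
    (hlt : ∀ a b : α, pyLt? (emb a) (emb b) = some (decide (a < b)))
    (heroes : List (String × List (String × Int))) (k : Int) (f : String → α) :
    ∀ (rest : List String) (g0 : String),
      (∀ g ∈ rest, bScore heroes k g = some (emb (f g))) →
      rest.foldlM (bStep heroes k) (g0, emb (f g0))
        = some (fargmax f g0 rest, emb (f (fargmax f g0 rest))) := by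
  intro rest
  induction rest with
  | nil => intro g0 _; rfl
  | cons q rest ih =>
    intro g0 hsc
    have hq : bScore heroes k q = some (emb (f q)) := hsc q (by simp)
    have hstep : bStep heroes k (g0, emb (f g0)) q
        = some (if f g0 < f q then q else g0, emb (f (if f g0 < f q then q else g0))) := by
      simp only [bStep, hq, hlt, Option.bind_some, Option.bind_eq_bind]
      by_cases h : f g0 < f q <;> simp [h]
    simp only [List.foldlM_cons, hstep, Option.bind_eq_bind, Option.bind_some]
    rw [ih _ (fun g hg => hsc g (by simp [hg]))]
    simp [fargmax]

-- Python max over an embedded column is the score of the first argmax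
theorem pymax_map {α : Type} [LinearOrder α] (emb : α → PyV)
    (hlt : ∀ a b : α, pyLt? (emb a) (emb b) = some (decide (a < b))) (f : String → α) :
    ∀ (rest : List String) (g0 : String),
      pyMax? ((g0 :: rest).map (fun g => emb (f g)))
        = some (emb (f (fargmax f g0 rest))) := by
  intro rest
  induction rest with
  | nil => intro g0; rfl
  | cons q rest ih =>
    intro g0
    show (List.map (fun g => emb (f g)) (q :: rest)).foldlM
        (fun cur x => (pyLt? cur x).map (fun b => if b then x else cur)) (emb (f g0)) = _
    rw [List.map_cons, List.foldlM_cons, hlt]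
    have : ((some (decide (f g0 < f q))).map
        (fun b => if b then emb (f q) else emb (f g0)))
        = some (emb (f (if f g0 < f q then q else g0))) := by
      by_cases h : f g0 < f q <;> simp [h]
    simp only [this, Option.bind_eq_bind, Option.bind_some]
    exact ih (if f g0 < f q then q else g0)

-- col.index(max) points back at the first argmax
theorem index_get {α : Type} [LinearOrder α] (emb : α → PyV)
    (hinj : Function.Injective emb) (f : String → α) :
    ∀ (rest : List String) (g0 : String),
      ∃ i, PySem.List.index? ((g0 :: rest).map (fun g => emb (f g)))
             (emb (f (fargmax f g0 rest))) = some i ∧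
           (g0 :: rest)[i]? = some (fargmax f g0 rest) := by
  intro rest
  induction rest with
  | nil =>
    intro g0
    exact ⟨0, PySem.List.index?_cons_self .., rfl⟩
  | cons q rest ih =>
    intro g0
    by_cases hqlt : f g0 < f q
    · obtain ⟨i, h1, h2⟩ := ih q
      have hfar : fargmax f g0 (q :: rest) = fargmax f q rest := by simp [fargmax, hqlt]
      have hneg : emb (f g0) ≠ emb (f (fargmax f q rest)) := fun he =>
        absurd (hinj he) (ne_of_lt (lt_of_lt_of_le hqlt (le_fargmax f rest q)))
      refine ⟨i + 1, ?_, ?_⟩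
      · rw [hfar, List.map_cons, PySem.List.index?_cons_of_ne _ hneg, h1]; rfl
      · rw [hfar, List.getElem?_cons_succ]; exact h2
    · obtain ⟨i, h1, h2⟩ := ih g0
      have hfar : fargmax f g0 (q :: rest) = fargmax f g0 rest := by simp [fargmax, hqlt]
      by_cases heq : f g0 = f (fargmax f g0 rest)
      · have hg0 : fargmax f g0 rest = g0 := fargmax_eq_self_of f rest g0 (le_of_eq heq.symm)
        refine ⟨0, ?_, ?_⟩
        · rw [hfar, hg0]; exact PySem.List.index?_cons_self ..
        · rw [hfar, hg0]; rfl
      · have hlt0 : f g0 < f (fargmax f g0 rest) := lt_of_le_of_ne (le_fargmax f rest g0) heq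
        have hneg : emb (f g0) ≠ emb (f (fargmax f g0 rest)) := fun he =>
          absurd (hinj he) (ne_of_lt hlt0)
        have hneq : emb (f q) ≠ emb (f (fargmax f g0 rest)) := fun he =>
          absurd (hinj he) (ne_of_lt (lt_of_le_of_lt (not_lt.mp hqlt) hlt0))
        rw [List.map_cons, PySem.List.index?_cons_of_ne _ hneg] at h1
        obtain ⟨j, hj, hij⟩ := Option.map_eq_some_iff.mp h1
        refine ⟨j + 2, ?_, ?_⟩
        · rw [hfar, List.map_cons, List.map_cons, PySem.List.index?_cons_of_ne _ hneg,
            PySem.List.index?_cons_of_ne _ hneq, hj]; rfl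
        · rw [hfar, List.getElem?_cons_succ, List.getElem?_cons_succ]
          rw [← hij] at h2
          rw [List.getElem?_cons_succ] at h2
          exact h2

-- A's select over an embedded column returns the first argmax
theorem aSelect_eq {α : Type} [LinearOrder α] (emb : α → PyV)
    (hinj : Function.Injective emb)
    (hlt : ∀ a b : α, pyLt? (emb a) (emb b) = some (decide (a < b)))
    (f : String → α) (g0 : String) (rest : List String) :
    aSelect ((g0 :: rest).map PyV.vs) ((g0 :: rest).map (fun g => emb (f g)))
      = fargmax f g0 rest := by
  obtain ⟨i, hidx, hget⟩ := index_get emb hinj f rest g0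
  simp only [aSelect, pymax_map emb hlt f rest g0, hidx, PySem.List.pyGet?_natCast,
    List.getElem?_map, hget, Option.map_some]

-- B on a nonempty group under an embedded score returns the first argmax
theorem alt_eq {α : Type} [LinearOrder α] (emb : α → PyV)
    (hlt : ∀ a b : α, pyLt? (emb a) (emb b) = some (decide (a < b)))
    (heroes : List (String × List (String × Int))) (k : Int) (f : String → α)
    (g0 : String) (rest : List String)
    (hsc : ∀ g ∈ g0 :: rest, bScore heroes k g = some (emb (f g))) :
    choice_hero_alt (g0 :: rest) heroes k = fargmax f g0 rest := by
  simp only [choice_hero_alt, hsc g0 (by simp), bfold_eq emb hlt heroes k f rest g0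
    (fun g hg => hsc g (by simp [hg]))]

-- the A-side column value heroes[g][key] (None when the key is missing)
def colv (heroes : List (String × List (String × Int))) (key : String) (g : String) : PyV :=
  match PySem.Dict.get? (PySem.Dict.mk heroes) g with
  | some h => attrVal h key
  | none => PyV.vn

-- A's building loop produces the six mapped columns
theorem build_eq (heroes : List (String × List (String × Int))) :
    ∀ (gs : List String) (i0 l0 f0 b0 p0 c0 : List PyV),
      (∀ h ∈ gs, ((PySem.Dict.get? (PySem.Dict.mk heroes) h).isSome : Bool) = true) →
      gs.foldl (aStep heroes) (some (i0, l0, f0, b0, p0, c0)) =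
        some (i0 ++ gs.map PyV.vs, l0 ++ gs.map (colv heroes "h_lead"),
              f0 ++ gs.map (colv heroes "h_force"), b0 ++ gs.map (colv heroes "h_brain"),
              p0 ++ gs.map (colv heroes "h_politics"), c0 ++ gs.map (colv heroes "h_charm")) := by
  intro gs
  induction gs with
  | nil => intro i0 l0 f0 b0 p0 c0 _; simp
  | cons g gs ih =>
    intro i0 l0 f0 b0 p0 c0 hpres
    obtain ⟨h, hh⟩ := Option.isSome_iff_exists.mp (hpres g (by simp))
    have hcg : ∀ key, colv heroes key g = attrVal h key := by
      intro key; simp [colv, hh]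
    rw [List.foldl_cons]
    show List.foldl (aStep heroes) (aStep heroes (some (i0, l0, f0, b0, p0, c0)) g) gs = _
    rw [show aStep heroes (some (i0, l0, f0, b0, p0, c0)) g
      = some (i0 ++ [PyV.vs g], l0 ++ [attrVal h "h_lead"], f0 ++ [attrVal h "h_force"],
              b0 ++ [attrVal h "h_brain"], p0 ++ [attrVal h "h_politics"],
              c0 ++ [attrVal h "h_charm"]) from by simp [aStep, hh]]
    rw [ih _ _ _ _ _ _ (fun x hx => hpres x (by simp [hx]))]
    simp [hcg]

-- id-column case (k = 0 or k = -6): both sides pick the first maximal id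
theorem case_id (heroes : List (String × List (String × Int))) (k : Int)
    (g0 : String) (rest : List String)
    (hkk : PySem.List.pyGet? bKeys k = some "h_id") :
    aSelect ((g0 :: rest).map PyV.vs) ((g0 :: rest).map PyV.vs)
      = choice_hero_alt (g0 :: rest) heroes k := by
  have hlt : ∀ a b : String, pyLt? (PyV.vs a) (PyV.vs b) = some (decide (a < b)) :=
    fun _ _ => rfl
  have hinj : Function.Injective PyV.vs := fun a b h => by injection h
  exact (aSelect_eq PyV.vs hinj hlt id g0 rest).trans
    (alt_eq PyV.vs hlt heroes k id g0 rest (fun g _ => by simp [bScore, hkk])).symm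

-- attribute-column cases (k selects one of the five attribute keys)
theorem case_attr (heroes : List (String × List (String × Int))) (k : Int) (key : String)
    (g0 : String) (rest : List String)
    (hkk : PySem.List.pyGet? bKeys k = some key) (hne : key ≠ "h_id")
    (hpres : ∀ h ∈ g0 :: rest, ((PySem.Dict.get? (PySem.Dict.mk heroes) h).isSome : Bool) = true)
    (hcase : (g0 :: rest).length = 1 ∨
      ∀ h ∈ g0 :: rest,
        (((PySem.Dict.get? (PySem.Dict.mk heroes) h).bind
           (fun d => PySem.Dict.get? (PySem.Dict.mk d) key)).isSome : Bool) = true) :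
    aSelect ((g0 :: rest).map PyV.vs) ((g0 :: rest).map (colv heroes key))
      = choice_hero_alt (g0 :: rest) heroes k := by
  have hlt : ∀ a b : Int, pyLt? (PyV.vi a) (PyV.vi b) = some (decide (a < b)) :=
    fun _ _ => rfl
  have hinj : Function.Injective PyV.vi := fun a b h => by injection h
  rcases hcase with hl | hp
  · -- singleton group: no comparison on either side, both return g0
    have hrest : rest = [] := by simpa using hl
    subst hrest
    obtain ⟨h, hh⟩ := Option.isSome_iff_exists.mp (hpres g0 (by simp))
    have ha : aSelect [PyV.vs g0] [colv heroes key g0] = g0 := by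
      simp only [aSelect, show pyMax? [colv heroes key g0] = some (colv heroes key g0) from rfl,
        PySem.List.index?_cons_self, PySem.List.pyGet?_natCast]
      rfl
    have hb : choice_hero_alt [g0] heroes k = g0 := by
      simp [choice_hero_alt, bScore, hkk, hne, hh]
    simpa [ha] using hb.symm
  · -- every listed hero has the key: embed the column into Int
    set F : String → Int := fun g =>
      (((PySem.Dict.get? (PySem.Dict.mk heroes) g).bind
        (fun h => PySem.Dict.get? (PySem.Dict.mk h) key))).getD 0 with hF
    have hdata : ∀ g ∈ g0 :: rest, ∃ h v, PySem.Dict.get? (PySem.Dict.mk heroes) g = some h ∧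
        PySem.Dict.get? (PySem.Dict.mk h) key = some v ∧ F g = v := by
      intro g hg
      obtain ⟨v, hv⟩ := Option.isSome_iff_exists.mp (hp g hg)
      obtain ⟨h, hh, hkv⟩ := Option.bind_eq_some_iff.mp hv
      exact ⟨h, v, hh, hkv, by simp [hF, hh, hkv]⟩
    have hcv : ∀ g ∈ g0 :: rest, colv heroes key g = PyV.vi (F g) := by
      intro g hg
      obtain ⟨h, v, hh, hkv, hFv⟩ := hdata g hg
      simp [colv, attrVal, hh, hkv, hFv]
    have hsc : ∀ g ∈ g0 :: rest, bScore heroes k g = some (PyV.vi (F g)) := by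
      intro g hg
      obtain ⟨h, v, hh, hkv, hFv⟩ := hdata g hg
      simp [bScore, hkk, hne, hh, hkv, hFv]
    rw [List.map_congr_left hcv]
    exact (aSelect_eq PyV.vi hinj hlt F g0 rest).trans
      (alt_eq PyV.vi hlt heroes k F g0 rest hsc).symm

-- ===== VERDICT (by name: the statement is the Claim_ definition above) =====
theorem choice_hero_spec : Claim_equal_choice_hero := by
  intro group_hero heroes k _ hpre
  obtain ⟨hne, hk1, hk2, hpres, hcase⟩ := hpre
  unfold Spec_choice_hero
  match group_hero, hne with
  | g0 :: rest, _ =>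
  unfold choice_hero
  rw [build_eq heroes (g0 :: rest) [] [] [] [] [] [] hpres]
  simp only [List.nil_append, List.isEmpty_cons, Bool.false_eq_true, if_false]
  have hcase' : ∀ key : String, key ≠ "h_id" →
      PySem.List.pyGet? bKeys k = some key →
      ((g0 :: rest).length = 1 ∨
        ∀ h ∈ g0 :: rest,
          (((PySem.Dict.get? (PySem.Dict.mk heroes) h).bind
             (fun d => PySem.Dict.get? (PySem.Dict.mk d) key)).isSome : Bool) = true) := by
    intro key hk hkk
    rcases hcase with h0 | h6 | hl | hp
    · subst h0; rw [show PySem.List.pyGet? bKeys (0:Int) = some "h_id" from by decide] at hkk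
      exact absurd (Option.some.inj hkk).symm hk
    · subst h6; rw [show PySem.List.pyGet? bKeys (-6:Int) = some "h_id" from by decide] at hkk
      exact absurd (Option.some.inj hkk).symm hk
    · exact Or.inl hl
    · right; rw [hkk] at hp; exact hp
  interval_cases k
  · -- k = -6
    exact case_id heroes (-6) g0 rest (by decide)
  · -- k = -5 : h_lead
    exact case_attr heroes (-5) "h_lead" g0 rest (by decide) (by decide) hpres
      (hcase' _ (by decide) (by decide))
  · exact case_attr heroes (-4) "h_force" g0 rest (by decide) (by decide) hpres
      (hcase' _ (by decide) (by decide))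
  · exact case_attr heroes (-3) "h_brain" g0 rest (by decide) (by decide) hpres
      (hcase' _ (by decide) (by decide))
  · exact case_attr heroes (-2) "h_politics" g0 rest (by decide) (by decide) hpres
      (hcase' _ (by decide) (by decide))
  · exact case_attr heroes (-1) "h_charm" g0 rest (by decide) (by decide) hpres
      (hcase' _ (by decide) (by decide))
  · exact case_id heroes 0 g0 rest (by decide)
  · exact case_attr heroes 1 "h_lead" g0 rest (by decide) (by decide) hpres
      (hcase' _ (by decide) (by decide))
  · exact case_attr heroes 2 "h_force" g0 rest (by decide) (by decide) hpres
      (hcase' _ (by decide) (by decide))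
  · exact case_attr heroes 3 "h_brain" g0 rest (by decide) (by decide) hpres
      (hcase' _ (by decide) (by decide))
  · exact case_attr heroes 4 "h_politics" g0 rest (by decide) (by decide) hpres
      (hcase' _ (by decide) (by decide))
  · exact case_attr heroes 5 "h_charm" g0 rest (by decide) (by decide) hpres
      (hcase' _ (by decide) (by decide))
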